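-- pv_equiv track=rewrite | github.com/SirineBayoudh/Bases-de-donn-es-Avanc-es | TP2/TP2_Exercice4_Complet.py | isCandidateKey
-- ===== SOURCE A (Python) =====
-- def computeAttributeClosure(F: "list of dependencies", K: "set"):
--     K_plus = set(K)
--     changed = True
--
--     while changed:
--         changed = False
--         for alpha, beta in F:
--             if alpha.issubset(K_plus) and not beta.issubset(K_plus):
--                 K_plus.update(beta)
--                 changed = True
--
--     return K_plus
--
-- def isSuperKey(F: "list of dependencies", R: "set", K: "set"):
--     return R.issubset(computeAttributeClosure(F, K))
--
-- def isCandidateKey(F: "list of dependencies", R: "set", K: "set"):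
--     if not isSuperKey(F, R, K):
--         return False
--
--     for A in list(K):
--         K1 = set(K)
--         K1.discard(A)
--         if isSuperKey(F, R, K1):
--             return False
--
--     return True
-- ===== SOURCE B (Python) =====
-- def isCandidateKey(F, R, K):
--     # worklist attribute closure: each dependency is examined only when an attribute
--     # of its LHS is newly added, and fires at most once
--     def closure(base):
--         closed = set(base)
--         queue = []
--         remaining = []
--         for alpha, beta in F:
--             if alpha <= closed:
--                 for b in beta:
--                     if b not in closed:
--                         closed.add(b)
--                         queue.append(b)
--             else:
--                 remaining.append((alpha, beta))
--         while queue: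
--             x = queue.pop()
--             still = []
--             for alpha, beta in remaining:
--                 if x in alpha and alpha <= closed:
--                     for b in beta:
--                         if b not in closed:
--                             closed.add(b)
--                             queue.append(b)
--                 else:
--                     still.append((alpha, beta))
--             remaining = still
--         return closed
--     if not (set(R) <= closure(K)):
--         return False
--     return all(not (set(R) <= closure(set(K) - {A})) for A in K)
-- ===== Notes on version B (the rewrite author's own statement) =====
-- stated objective: alternative
-- what changed: A recomputes full passes over all dependencies until a whole pass changes nothing; B computes the attribute closure with a worklist of newly added attributes, rechecking a pending dependency only when a popped attribute occurs in its LHS, so each dependency fires at most once and fired dependencies are never rescanned.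
import Mathlib
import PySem

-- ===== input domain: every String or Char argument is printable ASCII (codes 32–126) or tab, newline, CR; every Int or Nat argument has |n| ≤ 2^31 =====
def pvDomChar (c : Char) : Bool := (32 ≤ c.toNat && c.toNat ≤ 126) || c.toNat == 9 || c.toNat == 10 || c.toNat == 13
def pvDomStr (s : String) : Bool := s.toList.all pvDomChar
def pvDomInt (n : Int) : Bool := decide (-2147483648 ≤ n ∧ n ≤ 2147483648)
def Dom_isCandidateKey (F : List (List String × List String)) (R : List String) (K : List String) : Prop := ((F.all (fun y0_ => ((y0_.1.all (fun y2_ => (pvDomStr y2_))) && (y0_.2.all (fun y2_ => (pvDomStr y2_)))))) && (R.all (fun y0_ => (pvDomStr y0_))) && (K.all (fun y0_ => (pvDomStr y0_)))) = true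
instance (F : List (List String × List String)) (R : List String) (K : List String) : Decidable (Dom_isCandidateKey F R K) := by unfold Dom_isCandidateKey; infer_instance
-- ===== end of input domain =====

-- B replaces A's repeat-full-passes-until-no-change closure by a worklist closure in which each
-- dependency is rechecked only when an attribute of its LHS is newly added and fires at most once.

-- ===== PORT A =====
-- one 'for alpha, beta in F' pass of A's while-loop body, over the state (K_plus, changed)
def pvPassA (st : PySem.Set String × Bool) (p : List String × List String) : PySem.Set String × Bool :=
  if PySem.Set.issubset p.1 st.1 && !(PySem.Set.issubset p.2 st.1) then
    (PySem.Set.update st.1 p.2, true)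
  else st

-- A's 'while changed' loop, with fuel; pvClosureA passes fuel provably sufficient
-- (each pass that reports a change adds at least one new RHS attribute — see the lemmas below)
def pvLoopA (F : List (List String × List String)) : Nat → PySem.Set String → PySem.Set String
  | 0, S => S
  | n+1, S =>
    let r := F.foldl pvPassA (S, false)
    if r.2 then pvLoopA F n r.1 else r.1

def pvClosureA (F : List (List String × List String)) (K : List String) : PySem.Set String :=
  pvLoopA F ((F.flatMap (fun p => p.2)).length + 1) (PySem.Set.ofList K)

def pvIsSuperKeyA (F : List (List String × List String)) (R K : List String) : Bool :=
  PySem.Set.issubset (PySem.Set.ofList R) (pvClosureA F K)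

def isCandidateKey (F : List (List String × List String)) (R : List String) (K : List String) : Bool :=
  if !(pvIsSuperKeyA F R K) then false
  else if (PySem.Set.ofList K).any (fun A =>
      pvIsSuperKeyA F R (PySem.Set.discard (PySem.Set.ofList K) A)) then false
  else true

-- ===== PORT B =====
-- 'for b in beta: if b not in closed: closed.add(b); queue.append(b)'
-- (the Lean queue is kept in reversed order: Python appends at the end and pops from the end,
--  here we cons at the head and pop the head — the same stack discipline)
def pvAddNew (c : PySem.Set String) (q : List String) (beta : List String) : PySem.Set String × List String :=
  beta.foldl
    (fun cq b => if PySem.Set.contains cq.1 b then cq else (PySem.Set.add cq.1 b, b :: cq.2))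
    (c, q)

-- the shared body of Source B's two 'for alpha, beta in …' loops over (closed, queue, still),
-- parametrised by the guard (plain 'alpha <= closed', or 'x in alpha and alpha <= closed')
def pvFireStep (g : List String × List String → PySem.Set String → Bool)
    (st : PySem.Set String × List String × List (List String × List String))
    (p : List String × List String) :
    PySem.Set String × List String × List (List String × List String) :=
  if g p st.1 then
    let cq := pvAddNew st.1 st.2.1 p.2
    (cq.1, cq.2, st.2.2)
  else (st.1, st.2.1, st.2.2 ++ [p])

-- Source B's 'while queue' loop, with fuel; pvClosureB passes fuel provably sufficient
-- (every enqueued attribute is new, so pops are bounded by the number of RHS attributes)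
def pvLoopB : Nat → PySem.Set String → List String → List (List String × List String) → PySem.Set String
  | 0, c, _, _ => c
  | _+1, c, [], _ => c
  | n+1, c, x :: qs, rem =>
    let st := rem.foldl (pvFireStep (fun p c => p.1.contains x && PySem.Set.issubset p.1 c)) (c, qs, [])
    pvLoopB n st.1 st.2.1 st.2.2

def pvClosureB (F : List (List String × List String)) (base : List String) : PySem.Set String :=
  let st := F.foldl (pvFireStep (fun p c => PySem.Set.issubset p.1 c)) (PySem.Set.ofList base, [], [])
  pvLoopB (st.2.1.length + (F.flatMap (fun p => p.2)).length + 1) st.1 st.2.1 st.2.2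

def isCandidateKey_alt (F : List (List String × List String)) (R : List String) (K : List String) : Bool :=
  if !(PySem.Set.issubset (PySem.Set.ofList R) (pvClosureB F K)) then false
  else (PySem.Set.ofList K).all (fun A =>
    !(PySem.Set.issubset (PySem.Set.ofList R) (pvClosureB F (PySem.Set.diff (PySem.Set.ofList K) [A]))))

-- ===== PRECONDITION & SPEC =====
def Spec_isCandidateKey (F : List (List String × List String)) (R : List String) (K : List String) (out : Bool) : Prop := out = isCandidateKey_alt F R K
instance (F : List (List String × List String)) (R : List String) (K : List String) (out : Bool) : Decidable (Spec_isCandidateKey F R K out) := by unfold Spec_isCandidateKey; infer_instance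

-- ===== CLAIM (what is proved, stated in full; the proofs are below) =====
def Claim_equal_isCandidateKey : Prop := ∀ (F : List (List String × List String)) (R : List String) (K : List String), Dom_isCandidateKey F R K → Spec_isCandidateKey F R K (isCandidateKey F R K)

-- ===== LEMMAS AND PROOFS =====

-- S is closed under the functional dependencies F (membership-wise)
def pvFDClosed (F : List (List String × List String)) (S : List String) : Prop :=
  ∀ p ∈ F, (∀ a ∈ p.1, a ∈ S) → ∀ b ∈ p.2, b ∈ S

-- number of elements of U not yet in S (the termination measure of both loops)
def pvMiss (U S : List String) : Nat := (U.filter (fun x => decide (x ∉ S))).length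

theorem pvMiss_mono (U S S' : List String) (h : ∀ y ∈ S, y ∈ S') : pvMiss U S' ≤ pvMiss U S := by
  induction U with
  | nil => simp [pvMiss]
  | cons u us ih =>
    simp only [pvMiss, List.filter_cons]
    by_cases hu : u ∈ S'
    · have hu' : (decide (u ∉ S') : Bool) = false := by simp [hu]
      by_cases hu2 : u ∈ S
      · simp [hu, hu2]; have := ih; simp [pvMiss] at this; omega
      · simp [hu, hu2]; have := ih; simp [pvMiss] at this ⊢; omega
    · have hu2 : u ∉ S := fun hm => hu (h u hm)
      simp [hu, hu2]; have := ih; simp [pvMiss] at this ⊢; omega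


theorem pvMiss_lt (U S S' : List String) (h : ∀ y ∈ S, y ∈ S') (b : String)
    (hbU : b ∈ U) (hbS : b ∉ S) (hbS' : b ∈ S') : pvMiss U S' < pvMiss U S := by
  induction U with
  | nil => simp at hbU
  | cons u us ih =>
    simp only [pvMiss, List.filter_cons]
    rcases List.mem_cons.1 hbU with rfl | hbus
    · simp [hbS, hbS']
      have hm := pvMiss_mono us S S' h; simp [pvMiss] at hm; omega
    · have := ih hbus
      by_cases hu : u ∈ S'
      · by_cases hu2 : u ∈ S
        · simp [hu, hu2]; simpa [pvMiss] using this
        · simp [hu, hu2]; simp [pvMiss] at this; omega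
      · have hu2 : u ∉ S := fun hm => hu (h u hm)
        simp [hu, hu2]; simp [pvMiss] at this; omega


theorem pvMiss_le_len (U S : List String) : pvMiss U S ≤ U.length := by
  simpa [pvMiss] using List.length_filter_le (fun x => decide (x ∉ S)) U


-- ---- A-side ----

theorem passA_flag_true (l : List (List String × List String)) (S : PySem.Set String) :
    (l.foldl pvPassA (S, true)).2 = true := by
  induction l generalizing S with
  | nil => rfl
  | cons p l ih =>
    simp only [List.foldl_cons, pvPassA]
    split_ifs with h
    · exact ih _
    · exact ih S


theorem passA_mono (l : List (List String × List String)) (st : PySem.Set String × Bool) :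
    ∀ y ∈ st.1, y ∈ (l.foldl pvPassA st).1 := by
  induction l generalizing st with
  | nil => exact fun y hy => hy
  | cons p l ih =>
    intro y hy
    simp only [List.foldl_cons]
    apply ih
    simp only [pvPassA]
    split_ifs with h
    · simp only [PySem.Set.mem_update]; exact Or.inl hy
    · exact hy


theorem passA_sound (F l : List (List String × List String)) (st : PySem.Set String × Bool)
    (T : List String) (hl : ∀ p ∈ l, p ∈ F) (hT : pvFDClosed F T) (hS : ∀ y ∈ st.1, y ∈ T) :
    ∀ y ∈ (l.foldl pvPassA st).1, y ∈ T := by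
  induction l generalizing st with
  | nil => exact hS
  | cons p l ih =>
    simp only [List.foldl_cons]
    refine ih _ (fun p' hp' => hl p' (List.mem_cons_of_mem _ hp')) ?_
    intro y hy
    simp only [pvPassA] at hy
    split_ifs at hy with h
    · simp only [Bool.and_eq_true] at h
      have hsub := (PySem.Set.issubset_iff _ _).1 h.1
      have hbT : ∀ b ∈ p.2, b ∈ T :=
        hT p (hl p (List.mem_cons_self)) (fun a haa => hS _ (hsub a haa))
      rcases (PySem.Set.mem_update _ _ _).1 hy with h1 | h2
      · exact hS y h1
      · exact hbT y h2
    · exact hS y hy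


theorem passA_false (l : List (List String × List String)) (S : PySem.Set String)
    (h : (l.foldl pvPassA (S, false)).2 = false) :
    (l.foldl pvPassA (S, false)).1 = S ∧
      ∀ p ∈ l, (∀ a ∈ p.1, a ∈ S) → ∀ b ∈ p.2, b ∈ S := by
  induction l with
  | nil => exact ⟨rfl, by simp⟩
  | cons p l ih =>
    simp only [List.foldl_cons] at h
    by_cases hc : (PySem.Set.issubset p.1 S && !(PySem.Set.issubset p.2 S)) = true
    · exfalso
      have hstep : pvPassA (S, false) p = (PySem.Set.update S p.2, true) := by
        simp [pvPassA, hc]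
      rw [hstep] at h
      simp [passA_flag_true l _] at h
    · have hstep : pvPassA (S, false) p = (S, false) := by
        simp only [pvPassA]
        rw [if_neg]
        exact fun hcc => hc hcc
      rw [hstep] at h
      rcases ih h with ⟨h1, h2⟩
      refine ⟨by simpa [hstep] using h1, ?_⟩
      intro p' hp'
      rcases List.mem_cons.1 hp' with rfl | hp'
      · intro ha b hb
        have h1s : PySem.Set.issubset p'.1 S = true := (PySem.Set.issubset_iff _ _).2 ha
        by_cases h2s : PySem.Set.issubset p'.2 S = true
        · exact (PySem.Set.issubset_iff _ _).1 h2s b hb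
        · have h2f : PySem.Set.issubset p'.2 S = false := by
            cases hx : PySem.Set.issubset p'.2 S
            · rfl
            · exact absurd hx h2s
          exact absurd (by simp [h1s, h2f]) hc
      · exact h2 p' hp'


theorem passA_miss_lt (U : List String) (l : List (List String × List String))
    (st : PySem.Set String × Bool) (hb : ∀ p ∈ l, ∀ b ∈ p.2, b ∈ U)
    (hc : st.2 = false) (h : (l.foldl pvPassA st).2 = true) :
    pvMiss U (l.foldl pvPassA st).1 < pvMiss U st.1 := by
  induction l generalizing st with
  | nil => simp only [List.foldl_nil] at h; rw [hc] at h; exact absurd h (by simp)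
  | cons p l ih =>
    simp only [List.foldl_cons] at h ⊢
    by_cases hcc : (PySem.Set.issubset p.1 st.1 && !(PySem.Set.issubset p.2 st.1)) = true
    · have hstep : pvPassA st p = (PySem.Set.update st.1 p.2, true) := by
        simp [pvPassA, hcc]
      rw [hstep] at h ⊢
      simp only [Bool.and_eq_true, Bool.not_eq_true'] at hcc
      have hex : ∃ b ∈ p.2, b ∉ st.1 := by
        by_contra hq
        push_neg at hq
        rw [(PySem.Set.issubset_iff _ _).2 hq] at hcc
        exact absurd hcc.2 (by simp)
      rcases hex with ⟨b, hb2, hbn⟩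
      have hlt : pvMiss U (PySem.Set.update st.1 p.2) < pvMiss U st.1 := by
        refine pvMiss_lt U st.1 _ (fun y hy => (PySem.Set.mem_update _ _ _).2 (Or.inl hy)) b
          (hb p (List.mem_cons_self) b hb2) hbn ((PySem.Set.mem_update _ _ _).2 (Or.inr hb2))
      have hle : pvMiss U (l.foldl pvPassA (PySem.Set.update st.1 p.2, true)).1 ≤
          pvMiss U (PySem.Set.update st.1 p.2) := by
        exact pvMiss_mono U _ _ (passA_mono l (PySem.Set.update st.1 p.2, true))
      omega
    · have hstep : pvPassA st p = st := by
        simp only [pvPassA]; rw [if_neg (fun hcc2 => hcc hcc2)]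
      rw [hstep] at h ⊢
      exact ih st (fun p' hp' => hb p' (List.mem_cons_of_mem _ hp')) hc h


theorem loopA_spec (F : List (List String × List String)) (U : List String)
    (hb : ∀ p ∈ F, ∀ b ∈ p.2, b ∈ U) :
    ∀ (n : Nat) (S : PySem.Set String), pvMiss U S < n →
      (∀ y ∈ S, y ∈ pvLoopA F n S) ∧ pvFDClosed F (pvLoopA F n S) ∧
        (∀ T, pvFDClosed F T → (∀ y ∈ S, y ∈ T) → ∀ y ∈ pvLoopA F n S, y ∈ T) := by
  intro n
  induction n with
  | zero => intro S hS; omega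
  | succ n ih =>
    intro S hS
    have hsplit : pvLoopA F (n+1) S =
        if (F.foldl pvPassA (S, false)).2 then pvLoopA F n (F.foldl pvPassA (S, false)).1
        else (F.foldl pvPassA (S, false)).1 := rfl
    by_cases hr : (F.foldl pvPassA (S, false)).2 = true
    · rw [hsplit, if_pos hr]
      have hlt : pvMiss U (F.foldl pvPassA (S, false)).1 < pvMiss U S :=
        passA_miss_lt U F (S, false) hb rfl hr
      have hih := ih (F.foldl pvPassA (S, false)).1 (by omega)
      refine ⟨fun y hy => hih.1 y (passA_mono F (S, false) y hy), hih.2.1, ?_⟩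
      intro T hT hST
      exact hih.2.2 T hT (passA_sound F F (S, false) T (fun p hp => hp) hT hST)
    · rw [hsplit, if_neg hr]
      rcases passA_false F S ((Bool.not_eq_true _) ▸ hr) with ⟨h1, h2⟩
      rw [h1]
      exact ⟨fun y hy => hy, h2, fun T hT hST y hy => hST y hy⟩


theorem closureA_spec (F : List (List String × List String)) (K : List String) :
    (∀ y ∈ K, y ∈ pvClosureA F K) ∧ pvFDClosed F (pvClosureA F K) ∧
      (∀ T, pvFDClosed F T → (∀ y ∈ K, y ∈ T) → ∀ y ∈ pvClosureA F K, y ∈ T) := by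
  have hb : ∀ p ∈ F, ∀ b ∈ p.2, b ∈ PySem.Set.ofList (F.flatMap (fun p => p.2)) := by
    intro p hp b hbp
    rw [PySem.Set.mem_ofList]
    exact List.mem_flatMap.2 ⟨p, hp, hbp⟩
  have hfuel : pvMiss (PySem.Set.ofList (F.flatMap (fun p => p.2))) (PySem.Set.ofList K) <
      (F.flatMap (fun p => p.2)).length + 1 := by
    have h1 := pvMiss_le_len (PySem.Set.ofList (F.flatMap (fun p => p.2))) (PySem.Set.ofList K)
    have h2 := PySem.Set.length_ofList_le (F.flatMap (fun p => p.2))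
    omega
  have h := loopA_spec F _ hb _ _ hfuel
  refine ⟨fun y hy => h.1 y ((PySem.Set.mem_ofList _ _).2 hy), h.2.1, ?_⟩
  intro T hT hKT
  exact h.2.2 T hT (fun y hy => hKT y ((PySem.Set.mem_ofList _ _).1 hy))


-- ---- B-side ----

theorem addNew_mono_c (beta : List String) (c : PySem.Set String) (q : List String) :
    ∀ y ∈ c, y ∈ (pvAddNew c q beta).1 := by
  induction beta generalizing c q with
  | nil => exact fun y hy => hy
  | cons b bs ih =>
    intro y hy
    simp only [pvAddNew, List.foldl_cons]
    split_ifs with h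
    · exact ih c q y hy
    · exact ih _ _ y ((PySem.Set.mem_add _ _ _).2 (Or.inl hy))


theorem addNew_mono_q (beta : List String) (c : PySem.Set String) (q : List String) :
    ∀ y ∈ q, y ∈ (pvAddNew c q beta).2 := by
  induction beta generalizing c q with
  | nil => exact fun y hy => hy
  | cons b bs ih =>
    intro y hy
    simp only [pvAddNew, List.foldl_cons]
    split_ifs with h
    · exact ih c q y hy
    · exact ih _ _ y (List.mem_cons_of_mem _ hy)


theorem addNew_new_in_q (beta : List String) (c : PySem.Set String) (q : List String) :
    ∀ y ∈ (pvAddNew c q beta).1, y ∈ c ∨ y ∈ (pvAddNew c q beta).2 := by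
  induction beta generalizing c q with
  | nil => exact fun y hy => Or.inl hy
  | cons b bs ih =>
    intro y hy
    simp only [pvAddNew, List.foldl_cons] at hy ⊢
    split_ifs at hy ⊢ with h
    · exact ih c q y hy
    · rcases ih _ _ y hy with h1 | h2
      · rcases (PySem.Set.mem_add _ _ _).1 h1 with h3 | rfl
        · exact Or.inl h3
        · exact Or.inr (addNew_mono_q bs _ _ y List.mem_cons_self)
      · exact Or.inr h2


theorem addNew_beta_sub (beta : List String) (c : PySem.Set String) (q : List String) :
    ∀ b ∈ beta, b ∈ (pvAddNew c q beta).1 := by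
  induction beta generalizing c q with
  | nil => simp
  | cons b bs ih =>
    intro b' hb'
    simp only [pvAddNew, List.foldl_cons]
    rcases List.mem_cons.1 hb' with rfl | hb'
    · split_ifs with h
      · exact addNew_mono_c bs c q b' ((PySem.Set.contains_iff _ _).1 h)
      · exact addNew_mono_c bs _ _ b' ((PySem.Set.mem_add _ _ _).2 (Or.inr rfl))
    · split_ifs with h
      · exact ih c q b' hb'
      · exact ih _ _ b' hb'


theorem addNew_sound (beta : List String) (c : PySem.Set String) (q : List String)
    (T : List String) (hc : ∀ y ∈ c, y ∈ T) (hbeta : ∀ b ∈ beta, b ∈ T) :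
    ∀ y ∈ (pvAddNew c q beta).1, y ∈ T := by
  induction beta generalizing c q with
  | nil => exact hc
  | cons b bs ih =>
    intro y hy
    simp only [pvAddNew, List.foldl_cons] at hy
    split_ifs at hy with h
    · exact ih c q hc (fun b' hb' => hbeta b' (List.mem_cons_of_mem _ hb')) y hy
    · refine ih _ _ ?_ (fun b' hb' => hbeta b' (List.mem_cons_of_mem _ hb')) y hy
      intro z hz
      rcases (PySem.Set.mem_add _ _ _).1 hz with h1 | rfl
      · exact hc z h1
      · exact hbeta z List.mem_cons_self


theorem addNew_pot (U beta : List String) (c : PySem.Set String) (q : List String)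
    (hU : ∀ b ∈ beta, b ∈ U) :
    (pvAddNew c q beta).2.length + pvMiss U (pvAddNew c q beta).1 ≤ q.length + pvMiss U c := by
  induction beta generalizing c q with
  | nil => exact le_refl _
  | cons b bs ih =>
    simp only [pvAddNew, List.foldl_cons]
    split_ifs with h
    · exact ih c q (fun b' hb' => hU b' (List.mem_cons_of_mem _ hb'))
    · have hnb : b ∉ c := fun hm => by
        rw [(PySem.Set.contains_iff _ _).2 hm] at h; exact h rfl
      have hlt : pvMiss U (PySem.Set.add c b) < pvMiss U c :=
        pvMiss_lt U c _ (fun y hy => (PySem.Set.mem_add _ _ _).2 (Or.inl hy)) b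
          (hU b List.mem_cons_self) hnb ((PySem.Set.mem_add _ _ _).2 (Or.inr rfl))
      have := ih (PySem.Set.add c b) (b :: q) (fun b' hb' => hU b' (List.mem_cons_of_mem _ hb'))
      simp only [pvAddNew] at this
      simp only [List.length_cons] at this
      omega


-- growth facts about one guarded pass (G1: closed grows, G2: queue grows, G3: new ∈ queue)
theorem fire_G (g : List String × List String → PySem.Set String → Bool)
    (l : List (List String × List String))
    (st : PySem.Set String × List String × List (List String × List String)) :
    (∀ y ∈ st.1, y ∈ (l.foldl (pvFireStep g) st).1) ∧
    (∀ y ∈ st.2.1, y ∈ (l.foldl (pvFireStep g) st).2.1) ∧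
    (∀ y ∈ (l.foldl (pvFireStep g) st).1, y ∈ st.1 ∨ y ∈ (l.foldl (pvFireStep g) st).2.1) := by
  induction l generalizing st with
  | nil => exact ⟨fun y hy => hy, fun y hy => hy, fun y hy => Or.inl hy⟩
  | cons p l ih =>
    simp only [List.foldl_cons]
    have s1 : ∀ y ∈ st.1, y ∈ (pvFireStep g st p).1 := by
      intro y hy
      simp only [pvFireStep]
      split_ifs with h
      · exact addNew_mono_c _ _ _ y hy
      · exact hy
    have s2 : ∀ y ∈ st.2.1, y ∈ (pvFireStep g st p).2.1 := by
      intro y hy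
      simp only [pvFireStep]
      split_ifs with h
      · exact addNew_mono_q _ _ _ y hy
      · exact hy
    have s3 : ∀ y ∈ (pvFireStep g st p).1, y ∈ st.1 ∨ y ∈ (pvFireStep g st p).2.1 := by
      intro y hy
      simp only [pvFireStep] at hy ⊢
      split_ifs at hy ⊢ with h
      · exact addNew_new_in_q _ _ _ y hy
      · exact Or.inl hy
    rcases ih (pvFireStep g st p) with ⟨g1, g2, g3⟩
    refine ⟨fun y hy => g1 y (s1 y hy), fun y hy => g2 y (s2 y hy), ?_⟩
    intro y hy
    rcases g3 y hy with h1 | h2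
    · rcases s3 y h1 with h3 | h4
      · exact Or.inl h3
      · exact Or.inr (g2 y h4)
    · exact Or.inr h2


theorem fire_rem (g : List String × List String → PySem.Set String → Bool)
    (l : List (List String × List String))
    (st : PySem.Set String × List String × List (List String × List String)) :
    (∀ p ∈ st.2.2, p ∈ (l.foldl (pvFireStep g) st).2.2) ∧
    (∀ p ∈ (l.foldl (pvFireStep g) st).2.2, p ∈ st.2.2 ∨ p ∈ l) := by
  induction l generalizing st with
  | nil => exact ⟨fun p hp => hp, fun p hp => Or.inl hp⟩
  | cons p l ih =>
    simp only [List.foldl_cons]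
    have s1 : ∀ p' ∈ st.2.2, p' ∈ (pvFireStep g st p).2.2 := by
      intro p' hp'
      simp only [pvFireStep]
      split_ifs with h
      · exact hp'
      · exact List.mem_append_left _ hp'
    have s2 : ∀ p' ∈ (pvFireStep g st p).2.2, p' ∈ st.2.2 ∨ p' = p := by
      intro p' hp'
      simp only [pvFireStep] at hp'
      split_ifs at hp' with h
      · exact Or.inl hp'
      · rcases List.mem_append.1 hp' with h1 | h2
        · exact Or.inl h1
        · exact Or.inr (List.mem_singleton.1 h2)
    rcases ih (pvFireStep g st p) with ⟨r1, r2⟩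
    refine ⟨fun p' hp' => r1 p' (s1 p' hp'), ?_⟩
    intro p' hp'
    rcases r2 p' hp' with h1 | h2
    · rcases s2 p' h1 with h3 | rfl
      · exact Or.inl h3
      · exact Or.inr List.mem_cons_self
    · exact Or.inr (List.mem_cons_of_mem _ h2)


theorem fire_fired (g : List String × List String → PySem.Set String → Bool)
    (l : List (List String × List String))
    (st : PySem.Set String × List String × List (List String × List String)) :
    ∀ p ∈ l, p ∈ (l.foldl (pvFireStep g) st).2.2 ∨ ∀ b ∈ p.2, b ∈ (l.foldl (pvFireStep g) st).1 := by
  induction l generalizing st with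
  | nil => simp
  | cons p l ih =>
    intro p' hp'
    simp only [List.foldl_cons]
    rcases List.mem_cons.1 hp' with rfl | hp'
    · by_cases h : g p' st.1 = true
      · refine Or.inr ?_
        intro b hb
        have hb1 : b ∈ (pvFireStep g st p').1 := by
          simp only [pvFireStep, if_pos h]
          exact addNew_beta_sub _ _ _ b hb
        exact (fire_G g l (pvFireStep g st p')).1 b hb1
      · refine Or.inl ?_
        have hmem : p' ∈ (pvFireStep g st p').2.2 := by
          simp only [pvFireStep, if_neg h]
          exact List.mem_append_right _ (List.mem_singleton.2 rfl)
        exact (fire_rem g l (pvFireStep g st p')).1 p' hmem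
    · exact ih (pvFireStep g st p) p' hp'


theorem fire_sound (F : List (List String × List String))
    (g : List String × List String → PySem.Set String → Bool)
    (hg : ∀ p c, g p c = true → PySem.Set.issubset p.1 c = true)
    (l : List (List String × List String))
    (st : PySem.Set String × List String × List (List String × List String))
    (T : List String) (hl : ∀ p ∈ l, p ∈ F) (hT : pvFDClosed F T) (hS : ∀ y ∈ st.1, y ∈ T) :
    ∀ y ∈ (l.foldl (pvFireStep g) st).1, y ∈ T := by
  induction l generalizing st with
  | nil => exact hS
  | cons p l ih =>
    simp only [List.foldl_cons]
    refine ih _ (fun p' hp' => hl p' (List.mem_cons_of_mem _ hp')) ?_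
    intro y hy
    simp only [pvFireStep] at hy
    split_ifs at hy with h
    · have hsub := (PySem.Set.issubset_iff _ _).1 (hg p st.1 h)
      have hbT : ∀ b ∈ p.2, b ∈ T :=
        hT p (hl p List.mem_cons_self) (fun a haa => hS _ (hsub a haa))
      exact addNew_sound _ _ _ T hS hbT y hy
    · exact hS y hy


theorem fire_pot (U : List String)
    (g : List String × List String → PySem.Set String → Bool)
    (l : List (List String × List String))
    (st : PySem.Set String × List String × List (List String × List String))
    (hU : ∀ p ∈ l, ∀ b ∈ p.2, b ∈ U) :
    (l.foldl (pvFireStep g) st).2.1.length + pvMiss U (l.foldl (pvFireStep g) st).1 ≤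
      st.2.1.length + pvMiss U st.1 := by
  induction l generalizing st with
  | nil => exact le_refl _
  | cons p l ih =>
    simp only [List.foldl_cons]
    have hstep : (pvFireStep g st p).2.1.length + pvMiss U (pvFireStep g st p).1 ≤
        st.2.1.length + pvMiss U st.1 := by
      simp only [pvFireStep]
      split_ifs with h
      · exact addNew_pot U p.2 st.1 st.2.1 (hU p List.mem_cons_self)
      · exact le_refl _
    have := ih (pvFireStep g st p) (fun p' hp' => hU p' (List.mem_cons_of_mem _ hp'))
    omega


-- the witness invariant: every still-pending dependency has an LHS attribute outside closed or still queued
theorem fire_wit (g : List String × List String → PySem.Set String → Bool)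
    (l : List (List String × List String))
    (st : PySem.Set String × List String × List (List String × List String))
    (hwit : ∀ p ∈ st.2.2, ∃ a ∈ p.1, a ∉ st.1 ∨ a ∈ st.2.1)
    (hl : ∀ p ∈ l, (∀ c, g p c = false → PySem.Set.issubset p.1 c = false) ∨
          ∃ a ∈ p.1, a ∉ st.1 ∨ a ∈ st.2.1) :
    ∀ p ∈ (l.foldl (pvFireStep g) st).2.2,
      ∃ a ∈ p.1, a ∉ (l.foldl (pvFireStep g) st).1 ∨ a ∈ (l.foldl (pvFireStep g) st).2.1 := by
  induction l generalizing st with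
  | nil => exact hwit
  | cons p l ih =>
    simp only [List.foldl_cons]
    have pres : ∀ a, (a ∉ st.1 ∨ a ∈ st.2.1) →
        (a ∉ (pvFireStep g st p).1 ∨ a ∈ (pvFireStep g st p).2.1) := by
      intro a ha
      by_cases hm : a ∈ (pvFireStep g st p).1
      · refine Or.inr ?_
        simp only [pvFireStep] at hm ⊢
        split_ifs at hm ⊢ with h
        · rcases addNew_new_in_q _ _ _ a hm with h1 | h2
          · rcases ha with h3 | h4
            · exact absurd h1 h3
            · exact addNew_mono_q _ _ _ a h4
          · exact h2
        · rcases ha with h3 | h4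
          · exact absurd hm h3
          · exact h4
      · exact Or.inl hm
    refine ih (pvFireStep g st p) ?_ ?_
    · intro p' hp'
      by_cases h : g p st.1 = true
      · have hrem : (pvFireStep g st p).2.2 = st.2.2 := by
          simp only [pvFireStep, if_pos h]
        rw [hrem] at hp'
        rcases hwit p' hp' with ⟨a, ha1, ha2⟩
        exact ⟨a, ha1, pres a ha2⟩
      · have hrem : (pvFireStep g st p).2.2 = st.2.2 ++ [p] := by
          simp only [pvFireStep, if_neg h]
        have hcq : (pvFireStep g st p).1 = st.1 ∧ (pvFireStep g st p).2.1 = st.2.1 := by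
          constructor <;> simp only [pvFireStep, if_neg h]
        rw [hrem] at hp'
        rcases List.mem_append.1 hp' with h1 | h2
        · rcases hwit p' h1 with ⟨a, ha1, ha2⟩
          exact ⟨a, ha1, pres a ha2⟩
        · have hpp : p' = p := List.mem_singleton.1 h2
          subst hpp
          rcases hl p' List.mem_cons_self with hleft | ⟨a, ha1, ha2⟩
          · have hsub : PySem.Set.issubset p'.1 st.1 = false :=
              hleft st.1 ((Bool.not_eq_true _) ▸ h)
            have hnall : ¬ ∀ a ∈ p'.1, a ∈ st.1 := by
              intro hq
              rw [(PySem.Set.issubset_iff _ _).2 hq] at hsub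
              cases hsub
            push_neg at hnall
            rcases hnall with ⟨a, ha1, ha2⟩
            exact ⟨a, ha1, by rw [hcq.1]; exact Or.inl ha2⟩
          · exact ⟨a, ha1, pres a ha2⟩
    · intro p' hp'
      rcases hl p' (List.mem_cons_of_mem _ hp') with hleft | ⟨a, ha1, ha2⟩
      · exact Or.inl hleft
      · exact Or.inr ⟨a, ha1, pres a ha2⟩


theorem loopB_spec (F : List (List String × List String)) (U : List String)
    (hb : ∀ p ∈ F, ∀ b ∈ p.2, b ∈ U) :
    ∀ (n : Nat) (c : PySem.Set String) (q : List String)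
      (rem : List (List String × List String)),
      q.length + pvMiss U c < n →
      (∀ p ∈ rem, p ∈ F) →
      (∀ p ∈ rem, ∃ a ∈ p.1, a ∉ c ∨ a ∈ q) →
      (∀ p ∈ F, p ∈ rem ∨ ∀ b ∈ p.2, b ∈ c) →
      (∀ y ∈ c, y ∈ pvLoopB n c q rem) ∧ pvFDClosed F (pvLoopB n c q rem) ∧
        (∀ T, pvFDClosed F T → (∀ y ∈ c, y ∈ T) → ∀ y ∈ pvLoopB n c q rem, y ∈ T) := by
  intro n
  induction n with
  | zero => intro c q rem hpot _ _ _; omega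
  | succ n ih =>
    intro c q rem hpot hremF hwit hfired
    cases q with
    | nil =>
      refine ⟨fun y hy => hy, ?_, fun T hT hST y hy => hST y hy⟩
      intro p hp ha
      rcases hfired p hp with hrem | hbc
      · rcases hwit p hrem with ⟨a, ha1, ha2⟩
        rcases ha2 with h1 | h2
        · exact absurd (ha a ha1) h1
        · exact absurd h2 (List.not_mem_nil)
      · exact hbc
    | cons x qs =>
      have hg : ∀ (p : List String × List String) (c' : PySem.Set String),
          (fun (p : List String × List String) (c' : PySem.Set String) =>
            p.1.contains x && PySem.Set.issubset p.1 c') p c' = true →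
          PySem.Set.issubset p.1 c' = true := by
        intro p c' h
        simp only [Bool.and_eq_true] at h
        exact h.2
      have hU' : ∀ p ∈ rem, ∀ b ∈ p.2, b ∈ U := fun p hp => hb p (hremF p hp)
      have hpot' : (rem.foldl (pvFireStep (fun p c' => p.1.contains x && PySem.Set.issubset p.1 c')) (c, qs, [])).2.1.length +
          pvMiss U (rem.foldl (pvFireStep (fun p c' => p.1.contains x && PySem.Set.issubset p.1 c')) (c, qs, [])).1 < n := by
        have hfp := fire_pot U (fun p c' => p.1.contains x && PySem.Set.issubset p.1 c') rem (c, qs, []) hU'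
        have e1 : ((c, qs, ([] : List (List String × List String)))).2.1 = qs := rfl
        have e2 : ((c, qs, ([] : List (List String × List String)))).1 = c := rfl
        rw [e1, e2] at hfp
        simp only [List.length_cons] at hpot
        omega
      have hremF' : ∀ p ∈ (rem.foldl (pvFireStep (fun p c' => p.1.contains x && PySem.Set.issubset p.1 c')) (c, qs, [])).2.2, p ∈ F := by
        intro p hp
        rcases (fire_rem _ rem (c, qs, [])).2 p hp with h1 | h2
        · exact absurd h1 (List.not_mem_nil)
        · exact hremF p h2
      have hwit' := fire_wit (fun p c' => p.1.contains x && PySem.Set.issubset p.1 c') rem (c, qs, [])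
        (by intro p hp; exact absurd hp (List.not_mem_nil))
        (by
          intro p hp
          by_cases hx : x ∈ p.1
          · refine Or.inl ?_
            intro c' hgf
            rcases Bool.and_eq_false_iff.1 hgf with h1 | h2
            · exfalso
              have : p.1.contains x = true := by
                simpa using hx
              rw [this] at h1; cases h1
            · exact h2
          · refine Or.inr ?_
            rcases hwit p hp with ⟨a, ha1, ha2⟩
            rcases ha2 with h1 | h2
            · exact ⟨a, ha1, Or.inl h1⟩
            · rcases List.mem_cons.1 h2 with rfl | h3
              · exact absurd ha1 hx
              · exact ⟨a, ha1, Or.inr h3⟩)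
      have hfired' : ∀ p ∈ F, p ∈ (rem.foldl (pvFireStep (fun p c' => p.1.contains x && PySem.Set.issubset p.1 c')) (c, qs, [])).2.2 ∨
          ∀ b ∈ p.2, b ∈ (rem.foldl (pvFireStep (fun p c' => p.1.contains x && PySem.Set.issubset p.1 c')) (c, qs, [])).1 := by
        intro p hp
        rcases hfired p hp with hrem | hbc
        · exact fire_fired _ rem (c, qs, []) p hrem
        · exact Or.inr (fun b hb' => (fire_G _ rem (c, qs, [])).1 b (hbc b hb'))
      have hih := ih _ _ _ hpot' hremF' hwit' hfired'
      refine ⟨?_, hih.2.1, ?_⟩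
      · intro y hy
        exact hih.1 y ((fire_G _ rem (c, qs, [])).1 y hy)
      · intro T hT hST
        exact hih.2.2 T hT (fire_sound F _ hg rem (c, qs, []) T hremF hT hST)


theorem closureB_spec (F : List (List String × List String)) (K : List String) :
    (∀ y ∈ K, y ∈ pvClosureB F K) ∧ pvFDClosed F (pvClosureB F K) ∧
      (∀ T, pvFDClosed F T → (∀ y ∈ K, y ∈ T) → ∀ y ∈ pvClosureB F K, y ∈ T) := by
  have hb : ∀ p ∈ F, ∀ b ∈ p.2, b ∈ PySem.Set.ofList (F.flatMap (fun p => p.2)) := by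
    intro p hp b hbp
    rw [PySem.Set.mem_ofList]
    exact List.mem_flatMap.2 ⟨p, hp, hbp⟩
  have hg : ∀ (p : List String × List String) (c' : PySem.Set String),
      (fun (p : List String × List String) (c' : PySem.Set String) =>
        PySem.Set.issubset p.1 c') p c' = true → PySem.Set.issubset p.1 c' = true :=
    fun p c' h => h
  have hpot : (F.foldl (pvFireStep (fun p c' => PySem.Set.issubset p.1 c')) (PySem.Set.ofList K, [], [])).2.1.length +
      pvMiss (PySem.Set.ofList (F.flatMap (fun p => p.2)))
        (F.foldl (pvFireStep (fun p c' => PySem.Set.issubset p.1 c')) (PySem.Set.ofList K, [], [])).1 <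
      (F.foldl (pvFireStep (fun p c' => PySem.Set.issubset p.1 c')) (PySem.Set.ofList K, [], [])).2.1.length +
        (F.flatMap (fun p => p.2)).length + 1 := by
    have h1 := pvMiss_le_len (PySem.Set.ofList (F.flatMap (fun p => p.2)))
      (F.foldl (pvFireStep (fun p c' => PySem.Set.issubset p.1 c')) (PySem.Set.ofList K, [], [])).1
    have h2 := PySem.Set.length_ofList_le (F.flatMap (fun p => p.2))
    omega
  have hremF : ∀ p ∈ (F.foldl (pvFireStep (fun p c' => PySem.Set.issubset p.1 c')) (PySem.Set.ofList K, [], [])).2.2, p ∈ F := by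
    intro p hp
    rcases (fire_rem _ F (PySem.Set.ofList K, [], [])).2 p hp with h1 | h2
    · exact absurd h1 (List.not_mem_nil)
    · exact h2
  have hwit := fire_wit (fun p c' => PySem.Set.issubset p.1 c') F (PySem.Set.ofList K, [], [])
    (by intro p hp; exact absurd hp (List.not_mem_nil))
    (by intro p hp; exact Or.inl (fun c' h => h))
  have hfired := fire_fired (fun p c' => PySem.Set.issubset p.1 c') F (PySem.Set.ofList K, [], [])
  have hspec := loopB_spec F _ hb _ _ _ _ hpot hremF hwit hfired
  have hG := fire_G (fun p c' => PySem.Set.issubset p.1 c') F (PySem.Set.ofList K, [], [])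
  refine ⟨?_, hspec.2.1, ?_⟩
  · intro y hy
    exact hspec.1 y (hG.1 y ((PySem.Set.mem_ofList _ _).2 hy))
  · intro T hT hKT
    refine hspec.2.2 T hT ?_
    exact fire_sound F _ hg F (PySem.Set.ofList K, [], []) T (fun p hp => hp) hT
      (fun y hy => hKT y ((PySem.Set.mem_ofList _ _).1 hy))


-- ---- glue ----

theorem pv_mem_closure_iff (F : List (List String × List String)) (b1 b2 : List String)
    (hb : ∀ y, y ∈ b1 ↔ y ∈ b2) :
    ∀ y, y ∈ pvClosureA F b1 ↔ y ∈ pvClosureB F b2 := by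
  intro y
  rcases closureA_spec F b1 with ⟨ha1, ha2, ha3⟩
  rcases closureB_spec F b2 with ⟨hb1, hb2, hb3⟩
  constructor
  · intro hy
    exact ha3 (pvClosureB F b2) hb2 (fun z hz => hb1 z ((hb z).1 hz)) y hy
  · intro hy
    exact hb3 (pvClosureA F b1) ha2 (fun z hz => ha1 z ((hb z).2 hz)) y hy


theorem superkey_eq (F : List (List String × List String)) (R b1 b2 : List String)
    (hb : ∀ y, y ∈ b1 ↔ y ∈ b2) :
    PySem.Set.issubset (PySem.Set.ofList R) (pvClosureA F b1) =
      PySem.Set.issubset (PySem.Set.ofList R) (pvClosureB F b2) := by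
  have h := pv_mem_closure_iff F b1 b2 hb
  rw [Bool.eq_iff_iff]
  rw [PySem.Set.issubset_iff, PySem.Set.issubset_iff]
  constructor
  · intro hs x hx
    exact (h x).1 (hs x hx)
  · intro hs x hx
    exact (h x).2 (hs x hx)


theorem pv_if_any_eq_all (l : List String) (f g : String → Bool)
    (h : ∀ a ∈ l, f a = g a) :
    (if l.any f then false else true) = l.all (fun a => !g a) := by
  induction l with
  | nil => simp
  | cons a t ih =>
    have hfa := h a List.mem_cons_self
    have iht := ih (fun a' ha' => h a' (List.mem_cons_of_mem _ ha'))
    by_cases hf : f a = true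
    · simp [List.any_cons, List.all_cons, hf, ← hfa]
    · have hf' : f a = false := by
        cases hx : f a
        · rfl
        · exact absurd hx hf
      simp only [List.any_cons, List.all_cons, hf', ← hfa, Bool.false_or, Bool.not_false,
        Bool.true_and]
      exact iht

-- ===== VERDICT (by name: the statement is the Claim_ definition above) =====
theorem isCandidateKey_spec : Claim_equal_isCandidateKey := by
  unfold Claim_equal_isCandidateKey
  intro F R K _
  unfold Spec_isCandidateKey isCandidateKey isCandidateKey_alt pvIsSuperKeyA
  rw [superkey_eq F R K K (fun y => Iff.rfl)]
  by_cases hs : PySem.Set.issubset (PySem.Set.ofList R) (pvClosureB F K) = true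
  · rw [hs]
    simp only [Bool.not_true, Bool.false_eq_true, if_false]
    apply pv_if_any_eq_all
    intro A hA
    refine superkey_eq F R _ _ ?_
    intro y
    simp [PySem.Set.mem_discard, PySem.Set.mem_diff]
  · have hs' : PySem.Set.issubset (PySem.Set.ofList R) (pvClosureB F K) = false := by
      cases hx : PySem.Set.issubset (PySem.Set.ofList R) (pvClosureB F K)
      · rfl
      · exact absurd hx hs
    rw [hs']
    simp
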